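-- pv_equiv track=rewrite | github.com/AnhTran1610/codility | doctor_duty/doctors_duty.py | solution
-- ===== SOURCE A (Python) =====
-- def solution(A):
--     counter = 0
--     res_arr = []
--     id_obj = {}
--     # Iterate over rows of the 2D array
--     for i in range(len(A)):
--         obj = {}
--         # Iterate over columns of each row
--         for j in range(len(A[0])):
--             id_val = A[i][j]
--             # Track unique values in the current row
--             if id_val not in obj:
--                 obj[id_val] = True
--             # Track unique values across all rows
--             if id_val not in id_obj:
--                 id_obj[id_val] = True
--         # Store the unique values in the current row
--         res_arr.append(obj)
--     # Get an array of unique values across all rows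
--     id_arr = list(id_obj.keys())
--     # Count the columns where there are at least two rows with the same value
--     for i in range(len(id_arr)):
--         count = 0
--         # Iterate over rows and check if the value exists in the current column
--         for j in range(len(res_arr)):
--             if id_arr[i] in res_arr[j]:
--                 count += 1
--         # If there are at least two rows with the same value, increment the counter
--         if count >= 2:
--             counter += 1
--     return counter
-- ===== SOURCE B (Python) =====
-- def solution(A):
--     # One pass: per-value count of rows containing it (first len(A[0]) columns), then count values with >= 2 rows.
--     k = len(A[0])
--     cnt = {}
--     for row in A:
--         seen = set()
--         for v in row[:k]:
--             if v not in seen: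
--                 seen.add(v)
--                 cnt[v] = cnt.get(v, 0) + 1
--     return sum(1 for c in cnt.values() if c >= 2)
-- ===== Notes on version B (the rewrite author's own statement) =====
-- stated objective: faster
-- what changed: Replaces A's two-phase scheme (per-row membership dicts plus a second loop scanning all rows for every distinct value) with a single pass that accumulates per-value row-presence counts in one dict and then counts values with count >= 2.
-- outside the precondition, e.g. on solution([]): A returns 0, B raises IndexError
import Mathlib
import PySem

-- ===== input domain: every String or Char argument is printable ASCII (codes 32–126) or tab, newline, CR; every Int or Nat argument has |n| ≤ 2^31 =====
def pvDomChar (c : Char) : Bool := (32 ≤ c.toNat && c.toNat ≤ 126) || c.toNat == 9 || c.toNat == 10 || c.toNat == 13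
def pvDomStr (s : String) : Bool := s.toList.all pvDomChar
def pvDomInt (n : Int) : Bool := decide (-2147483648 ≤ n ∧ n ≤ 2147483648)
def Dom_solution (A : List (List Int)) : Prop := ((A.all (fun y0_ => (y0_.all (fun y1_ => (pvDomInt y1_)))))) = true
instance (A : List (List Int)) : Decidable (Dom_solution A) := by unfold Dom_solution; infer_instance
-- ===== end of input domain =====

-- B replaces A's per-value scan over all rows with one pass accumulating per-value row-presence counts (measured faster; asymptotic).

-- ===== PORT A =====
-- 'if id_val not in d: d[id_val] = True'
def objStep (d : PySem.Dict Int Bool) (v : Int) : PySem.Dict Int Bool :=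
  if d.contains v then d else d.insert v true

-- inner-loop body: the same update on obj and on id_obj
def innerStepA (st2 : PySem.Dict Int Bool × PySem.Dict Int Bool) (id_val : Int) :
    PySem.Dict Int Bool × PySem.Dict Int Bool :=
  (objStep st2.1 id_val, objStep st2.2 id_val)

-- one iteration of the first (row) loop: column loop 'for j in range(len(A[0]))', then res_arr.append(obj)
def stepRowA (k : Nat) (st : List (PySem.Dict Int Bool) × PySem.Dict Int Bool) (row : List Int) :
    List (PySem.Dict Int Bool) × PySem.Dict Int Bool :=
  let inner := (PySem.List.pyRange 0 k 1).foldl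
    (fun st2 j => innerStepA st2 (PySem.List.pyGetD row j 0)) (PySem.Dict.empty, st.2)
  (st.1 ++ [inner.1], inner.2)

-- 'count = 0; for j in range(len(res_arr)): if id_arr[i] in res_arr[j]: count += 1'
def countA (res_arr : List (PySem.Dict Int Bool)) (v : Int) : Int :=
  (PySem.List.pyRange 0 (PySem.List.len res_arr) 1).foldl
    (fun count j => if (PySem.List.pyGetD res_arr j PySem.Dict.empty).contains v
                    then count + 1 else count) (0 : Int)

def solution (A : List (List Int)) : Int :=
  let k := (PySem.List.pyGetD A 0 []).length
  let st := (PySem.List.pyRange 0 (PySem.List.len A) 1).foldl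
    (fun st i => stepRowA k st (PySem.List.pyGetD A i [])) ([], PySem.Dict.empty)
  let id_arr := st.2.keys
  (PySem.List.pyRange 0 (PySem.List.len id_arr) 1).foldl
    (fun counter i =>
      if 2 ≤ countA st.1 (PySem.List.pyGetD id_arr i 0) then counter + 1 else counter) (0 : Int)

-- ===== PORT B =====
-- inner body of Source B: 'if v not in seen: seen.add(v); cnt[v] = cnt.get(v, 0) + 1'
def innerStepB (p : PySem.Set Int × PySem.Dict Int Int) (v : Int) :
    PySem.Set Int × PySem.Dict Int Int :=
  if PySem.Set.contains p.1 v then p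
  else (PySem.Set.add p.1 v, p.2.insert v (p.2.getD v 0 + 1))

def solution_alt (A : List (List Int)) : Int :=
  let k := (PySem.List.pyGetD A 0 []).length
  let cnt := A.foldl
    (fun cnt row =>
      ((PySem.List.slice row none (some (k : Int))).foldl innerStepB (PySem.Set.empty, cnt)).2)
    PySem.Dict.empty
  cnt.values.foldl (fun acc c => if 2 ≤ c then acc + 1 else acc) 0

-- ===== PRECONDITION & SPEC =====
-- Pre_ excludes inputs with a row shorter than row 0, where A raises (IndexError on A[i][j]),
-- and the degenerate empty input [], where A happens never to evaluate len(A[0]) and returns 0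
-- while B (which reads len(A[0]) up front, as A does on every non-empty input) raises IndexError.
def Pre_solution (A : List (List Int)) : Prop :=
  A ≠ [] ∧ ∀ r ∈ A, (A.headD []).length ≤ r.length
instance (A : List (List Int)) : Decidable (Pre_solution A) := by unfold Pre_solution; infer_instance

def pvWitness_solution : List (List Int) := [[1, 2], [2, 3], [4, 2]]

def Spec_solution (A : List (List Int)) (out : Int) : Prop := out = solution_alt A
instance (A : List (List Int)) (out : Int) : Decidable (Spec_solution A out) := by unfold Spec_solution; infer_instance

-- ===== CLAIM (what is proved, stated in full; the proofs are below) =====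
def Claim_equal_solution : Prop := ∀ (A : List (List Int)), Dom_solution A → Pre_solution A → Spec_solution A (solution A)

-- ===== LEMMAS AND PROOFS =====

-- 'for j in range(k): … xs[j] …' visits exactly the first k elements
theorem foldl_range_getD_take {σ : Type} (row : List Int) (k : Nat) (hk : k ≤ row.length)
    (f : σ → Int → σ) (init : σ) :
    (PySem.List.pyRange 0 (k : Int) 1).foldl (fun acc j => f acc (PySem.List.pyGetD row j 0)) init
      = (row.take k).foldl f init := by
  induction k with
  | zero => simp [PySem.List.pyRange_one_eq_nil (by omega : (0:Int) ≤ 0)]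
  | succ n ih =>
    have hn : n ≤ row.length := by omega
    have hlt : n < row.length := by omega
    rw [show ((n + 1 : Nat) : Int) = (n : Int) + 1 by push_cast; ring,
        PySem.List.pyRange_one_succ_right (by positivity), List.foldl_append, ih hn,
        List.take_add_one, List.getElem?_eq_getElem hlt]
    simp only [List.foldl_cons, List.foldl_nil, Option.toList_some, List.foldl_append]
    rw [PySem.List.pyGetD_ofNat row n 0 hlt]

theorem foldl_prod_split {α β γ : Type} (l : List γ) (f : α → γ → α) (g : β → γ → β)
    (a : α) (b : β) :
    l.foldl (fun p v => (f p.1 v, g p.2 v)) (a, b) = (l.foldl f a, l.foldl g b) := by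
  induction l generalizing a b with
  | nil => rfl
  | cons x t ih => simpa using ih (f a x) (g b x)

theorem contains_foldl_objStep (l : List Int) (d : PySem.Dict Int Bool) (x : Int) :
    (l.foldl objStep d).contains x = (d.contains x || decide (x ∈ l)) := by
  induction l generalizing d with
  | nil => simp
  | cons v t ih =>
    simp only [List.foldl_cons, ih, objStep]
    by_cases hv : d.contains v = true
    · rw [if_pos hv]
      by_cases hx : x = v
      · subst hx; rw [hv]; simp
      · simp [hx]
    · rw [if_neg hv, PySem.Dict.contains_insert]
      by_cases hx : x = v
      · subst hx; simp [hv]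
      · simp [beq_eq_false_iff_ne.mpr hx, hx]

theorem keys_foldl_objStep (l : List Int) (d : PySem.Dict Int Bool) :
    (l.foldl objStep d).keys = PySem.Set.update d.keys l := by
  induction l generalizing d with
  | nil => rfl
  | cons v t ih =>
    simp only [List.foldl_cons, ih, objStep]
    rw [show PySem.Set.update d.keys (v :: t)
          = PySem.Set.update (PySem.Set.add d.keys v) t from rfl]
    by_cases hv : d.contains v = true
    · have hvk : v ∈ d.keys := by
        rw [PySem.Dict.contains_eq_decide_mem_keys] at hv
        simpa using hv
      rw [if_pos hv, show PySem.Set.add d.keys v = d.keys by simp [PySem.Set.add, hvk]]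
    · have hne : d.contains v = false := by simpa using hv
      have hnm : v ∉ d.keys := by
        rw [PySem.Dict.contains_eq_decide_mem_keys] at hne
        simpa using hne
      rw [if_neg hv, PySem.Dict.keys_insert_of_not_contains d true hne,
        show PySem.Set.add d.keys v = d.keys ++ [v] by simp [PySem.Set.add, hnm]]

-- first loop of A, characterised
theorem firstLoopA (k : Nat) (L : List (List Int)) (res : List (PySem.Dict Int Bool))
    (d : PySem.Dict Int Bool) (hL : ∀ r ∈ L, k ≤ r.length) :
    L.foldl (stepRowA k) (res, d)
      = (res ++ L.map (fun r => (r.take k).foldl objStep PySem.Dict.empty),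
         ((L.map (List.take k)).flatten).foldl objStep d) := by
  induction L generalizing res d with
  | nil => simp
  | cons r t ih =>
    have hr : k ≤ r.length := hL r (by simp)
    have step : stepRowA k (res, d) r
        = (res ++ [(r.take k).foldl objStep PySem.Dict.empty], (r.take k).foldl objStep d) := by
      simp only [stepRowA]
      rw [foldl_range_getD_take r k hr innerStepA (PySem.Dict.empty, d),
          show innerStepA = (fun (p : _ × _) v => (objStep p.1 v, objStep p.2 v)) from rfl,
          foldl_prod_split]
    rw [List.foldl_cons, step, ih _ _ (fun r hr => hL r (by simp [hr]))]
    simp [List.foldl_append]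

theorem foldl_count_int {α : Type} (l : List α) (p : α → Bool) (c : Int) :
    l.foldl (fun c x => if p x then c + 1 else c) c = c + l.countP p := by
  induction l generalizing c with
  | nil => simp
  | cons x t ih =>
    by_cases hx : p x = true
    · simp [hx, ih]; ring
    · simp [hx, ih]

-- B's inner (per-row) loop, characterised
theorem rowLoopB (l : List Int) (s : PySem.Set Int) (d : PySem.Dict Int Int)
    (hs : ∀ v ∈ s, d.contains v = true) (hnd : d.keys.Nodup) :
    ((l.foldl innerStepB (s, d)).2.keys = PySem.Set.update d.keys l)
    ∧ (l.foldl innerStepB (s, d)).2.keys.Nodup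
    ∧ ∀ w, (l.foldl innerStepB (s, d)).2.getD w 0
          = d.getD w 0 + (if w ∈ l ∧ w ∉ s then 1 else 0) := by
  induction l generalizing s d with
  | nil => exact ⟨rfl, hnd, fun w => by simp⟩
  | cons v t ih =>
    rw [show PySem.Set.update d.keys (v :: t)
          = PySem.Set.update (PySem.Set.add d.keys v) t from rfl]
    by_cases hv : v ∈ s
    · have hb : innerStepB (s, d) v = (s, d) := by
        simp [innerStepB, PySem.Set.contains, hv]
      have hvk : v ∈ d.keys := by
        have := hs v hv
        rw [PySem.Dict.contains_eq_decide_mem_keys] at this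
        simpa using this
      have hadd : PySem.Set.add d.keys v = d.keys := by simp [PySem.Set.add, hvk]
      obtain ⟨h1, h2, h3⟩ := ih s d hs hnd
      rw [List.foldl_cons, hb, hadd]
      refine ⟨h1, h2, fun w => ?_⟩
      rw [h3 w]
      congr 1
      by_cases hw : w = v
      · subst hw; simp [hv]
      · simp [hw]
    · have hb : innerStepB (s, d) v = (PySem.Set.add s v, d.insert v (d.getD v 0 + 1)) := by
        simp [innerStepB, PySem.Set.contains, hv]
      have hs' : ∀ w ∈ PySem.Set.add s v, (d.insert v (d.getD v 0 + 1)).contains w = true := by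
        intro w hw
        rcases (PySem.Set.mem_add s v w).mp hw with hw | hw
        · rw [PySem.Dict.contains_insert]; simp [hs w hw]
        · subst hw; exact PySem.Dict.contains_insert_self d w _
      have hkeys : (d.insert v (d.getD v 0 + 1)).keys = PySem.Set.add d.keys v := by
        by_cases hc : d.contains v = true
        · have hvk : v ∈ d.keys := by
            rw [PySem.Dict.contains_eq_decide_mem_keys] at hc; simpa using hc
          rw [PySem.Dict.keys_insert_of_contains d _ hc]; simp [PySem.Set.add, hvk]
        · have hcf : d.contains v = false := by simpa using hc
          have hnm : v ∉ d.keys := by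
            rw [PySem.Dict.contains_eq_decide_mem_keys] at hcf; simpa using hcf
          rw [PySem.Dict.keys_insert_of_not_contains d _ hcf]; simp [PySem.Set.add, hnm]
      have hnd' : (d.insert v (d.getD v 0 + 1)).keys.Nodup := by
        rw [hkeys]
        by_cases hvk : v ∈ d.keys
        · simpa [PySem.Set.add, hvk] using hnd
        · rw [show PySem.Set.add d.keys v = d.keys ++ [v] by simp [PySem.Set.add, hvk]]
          refine List.Nodup.append hnd (by simp) ?_
          intro a ha hb'
          simp only [List.mem_singleton] at hb'
          exact hvk (hb' ▸ ha)
      obtain ⟨h1, h2, h3⟩ := ih (PySem.Set.add s v) (d.insert v (d.getD v 0 + 1)) hs' hnd'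
      rw [List.foldl_cons, hb]
      refine ⟨by rw [h1, hkeys], h2, fun w => ?_⟩
      rw [h3 w, PySem.Dict.getD_insert]
      by_cases hw : w = v
      · subst hw
        have hno : ¬ (w ∈ t ∧ w ∉ PySem.Set.add s w) :=
          fun h => h.2 ((PySem.Set.mem_add s w w).mpr (Or.inr rfl))
        rw [if_pos rfl, if_neg hno, if_pos ⟨List.mem_cons_self, hv⟩]
        ring
      · rw [if_neg hw]
        congr 1
        simp [PySem.Set.mem_add, List.mem_cons, hw]

theorem outerLoopB (k : Nat) (L : List (List Int)) (cnt : PySem.Dict Int Int)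
    (hnd : cnt.keys.Nodup) :
    ((L.foldl (fun cnt row => ((row.take k).foldl innerStepB (PySem.Set.empty, cnt)).2) cnt).keys
        = PySem.Set.update cnt.keys ((L.map (List.take k)).flatten))
    ∧ (L.foldl (fun cnt row => ((row.take k).foldl innerStepB (PySem.Set.empty, cnt)).2) cnt).keys.Nodup
    ∧ ∀ w, (L.foldl (fun cnt row => ((row.take k).foldl innerStepB (PySem.Set.empty, cnt)).2) cnt).getD w 0
          = cnt.getD w 0 + (L.countP (fun row => decide (w ∈ row.take k)) : Int) := by
  induction L generalizing cnt with
  | nil => exact ⟨rfl, hnd, fun w => by simp⟩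
  | cons r t ih =>
    obtain ⟨r1, r2, r3⟩ := rowLoopB (r.take k) PySem.Set.empty cnt (by intro v hv; cases hv) hnd
    obtain ⟨h1, h2, h3⟩ := ih _ r2
    refine ⟨?_, by simpa using h2, ?_⟩
    · simp only [List.foldl_cons]
      rw [h1, r1]
      simp [PySem.Set.update, List.foldl_append]
    · intro w
      simp only [List.foldl_cons]
      rw [h3 w, r3 w, List.countP_cons]
      by_cases hw : w ∈ r.take k
      · simp only [hw, true_and, decide_true]
        rw [if_pos (by simp [PySem.Set.empty])]
        push_cast
        ring
      · simp [hw]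

-- bridging 'for i in range(len(xs))' loops to structural folds
theorem outerA (k : Nat) (A : List (List Int)) :
    (PySem.List.pyRange 0 (PySem.List.len A) 1).foldl
        (fun st i => stepRowA k st (PySem.List.pyGetD A i []))
        ([], PySem.Dict.empty)
      = A.foldl (stepRowA k) ([], PySem.Dict.empty) := by
  rw [PySem.List.foldl_pyRange_pyGetD A [] (stepRowA k) ([], PySem.Dict.empty) (le_refl 0)]
  simp

theorem countA_eq (k : Nat) (L : List (List Int)) (v : Int) :
    countA (L.map (fun r => (r.take k).foldl objStep PySem.Dict.empty)) v
      = ((L.countP (fun r => decide (v ∈ r.take k)) : Nat) : Int) := by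
  unfold countA
  rw [PySem.List.foldl_pyRange_pyGetD _ PySem.Dict.empty
      (fun count o => if o.contains v then count + 1 else count) 0 (le_refl 0)]
  simp only [Int.toNat_zero, List.drop_zero]
  rw [foldl_count_int, List.countP_map, zero_add]
  norm_cast
  exact List.countP_congr (fun r _ => by
    simp [Function.comp, contains_foldl_objStep])

theorem secondLoopA (res : List (PySem.Dict Int Bool)) (id_arr : List Int) :
    (PySem.List.pyRange 0 (PySem.List.len id_arr) 1).foldl
        (fun counter i =>
          if 2 ≤ countA res (PySem.List.pyGetD id_arr i 0) then counter + 1 else counter)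
        (0 : Int)
      = id_arr.foldl
          (fun counter v => if 2 ≤ countA res v then counter + 1 else counter) (0 : Int) := by
  rw [PySem.List.foldl_pyRange_pyGetD id_arr 0
      (fun counter v => if 2 ≤ countA res v then counter + 1 else counter) 0 (le_refl 0)]
  simp

-- ===== VERDICT (by name: the statement is the Claim_ definition above) =====
theorem solution_spec : Claim_equal_solution := by
  unfold Claim_equal_solution
  intro A _ hpre
  obtain ⟨hne, hlen⟩ := hpre
  obtain ⟨a, t, rfl⟩ : ∃ a t, A = a :: t := by
    cases A with
    | nil => exact absurd rfl hne
    | cons a t => exact ⟨a, t, rfl⟩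
  have hL : ∀ r ∈ a :: t, a.length ≤ r.length := by simpa using hlen
  have hk : PySem.List.pyGetD (a :: t) 0 ([] : List Int) = a := by
    rw [PySem.List.pyGetD_zero]; rfl
  unfold Spec_solution
  -- evaluate A's port
  obtain ⟨b1, b2, b3⟩ :=
    outerLoopB a.length (a :: t) PySem.Dict.empty PySem.Dict.nodup_keys_empty
  simp only [solution, solution_alt, hk]
  rw [outerA, firstLoopA a.length (a :: t) [] PySem.Dict.empty hL]
  simp only [List.nil_append]
  rw [keys_foldl_objStep, PySem.Dict.keys_empty]
  refine (secondLoopA _ _).trans ?_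
  -- evaluate B's port
  simp only [PySem.List.slice_to_natCast]
  rw [PySem.Dict.values_eq_map_keys _ b2 0, List.foldl_map, b1, PySem.Dict.keys_empty]
  -- both are now folds over the same distinct-value list; the counted quantities agree
  refine PySem.List.foldl_congr_mem _ _ _ _ (fun acc v _ => ?_)
  rw [countA_eq, b3 v, PySem.Dict.getD_empty, zero_add]
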